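-- pv_equiv track=rewrite | github.com/RayWolters/VisAnalytics | views/sunburst.py | departments_preprocessing
-- ===== SOURCE A (Python) =====
-- def departments_preprocessing(input_name):
--     ############################################# PRE-PROCESSING ################################################ Sunburst 2) Hierarchy of all other departments
--     # List of labels for all other departments
--     labels = [
--             'Board',
--             'Engineering', 'IT', 'Security', 'Facilities',
--             'Dedos', 'Onda', 'Balas', 'Nubarron', 'Haber', 'E. Orilla', 'V. Frente', 'Borrasca', 'Cazar', 'Azada', 'B. Frente', 'Calzas', 'Tempestad', 'K. Orilla',
--             'Bergen', 'Forluniau', 'Baza', 'Calixto', 'Flecha', 'Alcazar',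
--             'Resumir', 'Lais', 'Fusil', 'V. Lagos', 'Osvaldo', 'Bodrogi', 'E. Vann', 'I. Vann', 'Cocinaro', 'Herrero', 'M.Mies', 'Ferro',
--             'Ovan', 'Coginian', 'B. Hawelon', 'V. Morlun', 'Nant', 'Hafon', 'Awelon', 'Arpa', 'C. Hawelon', 'H. Mies', 'A. Morlun', 'Scozzesse', 'Morluniau']
--
--     # List of parents for all other departments
--     parents = [
--             '',
--             'Board','Board', 'Board', 'Board',
--             'Engineering', 'Engineering','Dedos', 'Dedos', 'Dedos', 'Onda', 'Onda','Onda','Onda', 'Balas', 'Nubarron', 'E. Orilla', 'V. Frente', 'Borrasca',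
--             'IT', 'Bergen', 'Bergen','Bergen','Bergen', 'Bergen',
--             'Security', 'Resumir','Resumir','Resumir','Resumir','Resumir','Resumir','Fusil', 'V. Lagos', 'Osvaldo', 'Bodrogi', 'E. Vann',
--             'Facilities','Ovan','Ovan','Ovan','Ovan','Ovan','Coginian','Coginian',  'B. Hawelon','B. Hawelon', 'V. Morlun', 'Nant', 'Hafon']
--
--     # List of labels for the engineering department
--     labels_engineering = ['Engineering','Dedos', 'Onda', 'Balas', 'Nubarron', 'E. Orilla', 'V. Frente', 'Borrasca', 'Cazar', 'Azada', 'B. Frente', 'Calzas', 'Tempestad', 'K. Orilla']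
--     # List of labels for the IT department
--     labels_it = ['IT', 'Bergen', 'Baza', 'Calixto', 'Flecha', 'Alcazar']
--     # List of labels for the security department
--     labels_security = ['Security', 'Resumir', 'Fusil', 'V. Lagos', 'Osvaldo', 'Bodrogi', 'E. Vann', 'I. Vann', 'Cocinaro', 'Herrero', 'M.Mies', 'Ferro']
--     # List of labels for the facility department
--     labels_facilities = ['Facilities', 'Ovan', 'Coginian', 'B. Hawelon', 'V. Morlun', 'Nant', 'Hafon', 'Awelon', 'Arpa', 'C. Hawelon', 'H. Mies', 'A. Morlun', 'Scozzesse', 'Morluniau']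
--     # List of labels for the assistents
--     labels_assitents = ['Haber', 'Forluniau', 'Lais']
--     # List of labels for the executive department
--     labels_executive=['Board']
--
--     # Color each department differently
--     # TODO: Check color choices
--     colors1 = []
--     for p in labels:
--         if p == input_name:
--             colors1.append("black")
--         else:
--             if p in labels_engineering:
--                 colors1.append("red")
--             elif p in labels_assitents:
--                 colors1.append("grey")
--             elif p in labels_it:
--                 colors1.append("blue")
--             elif p in labels_security:
--                 colors1.append("orange")
--             elif p in labels_facilities:
--                 colors1.append("purple")
--             elif p in labels_executive:
--                 colors1.append("green")
--
--
--     return labels, parents, colors1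
-- ===== SOURCE B (Python) =====
-- # B: every label belongs to exactly one category, so the category colors are a fixed
-- # function of the (constant) labels list; precompute that per-label color table once as
-- # a constant aligned with labels, and build colors1 in a single zip pass that only
-- # overrides the matched label with "black" -- no membership classification at run time.
--
-- _LABELS = [
--         'Board',
--         'Engineering', 'IT', 'Security', 'Facilities',
--         'Dedos', 'Onda', 'Balas', 'Nubarron', 'Haber', 'E. Orilla', 'V. Frente', 'Borrasca', 'Cazar', 'Azada', 'B. Frente', 'Calzas', 'Tempestad', 'K. Orilla',
--         'Bergen', 'Forluniau', 'Baza', 'Calixto', 'Flecha', 'Alcazar',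
--         'Resumir', 'Lais', 'Fusil', 'V. Lagos', 'Osvaldo', 'Bodrogi', 'E. Vann', 'I. Vann', 'Cocinaro', 'Herrero', 'M.Mies', 'Ferro',
--         'Ovan', 'Coginian', 'B. Hawelon', 'V. Morlun', 'Nant', 'Hafon', 'Awelon', 'Arpa', 'C. Hawelon', 'H. Mies', 'A. Morlun', 'Scozzesse', 'Morluniau']
--
-- _PARENTS = [
--         '',
--         'Board','Board', 'Board', 'Board',
--         'Engineering', 'Engineering','Dedos', 'Dedos', 'Dedos', 'Onda', 'Onda','Onda','Onda', 'Balas', 'Nubarron', 'E. Orilla', 'V. Frente', 'Borrasca',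
--         'IT', 'Bergen', 'Bergen','Bergen','Bergen', 'Bergen',
--         'Security', 'Resumir','Resumir','Resumir','Resumir','Resumir','Resumir','Fusil', 'V. Lagos', 'Osvaldo', 'Bodrogi', 'E. Vann',
--         'Facilities','Ovan','Ovan','Ovan','Ovan','Ovan','Coginian','Coginian',  'B. Hawelon','B. Hawelon', 'V. Morlun', 'Nant', 'Hafon']
--
-- # department color of each label, in the same order as _LABELS
-- _BASE_COLORS = [
--         'green',
--         'red', 'blue', 'orange', 'purple',
--         'red', 'red', 'red', 'red', 'grey', 'red', 'red', 'red', 'red', 'red', 'red', 'red', 'red', 'red',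
--         'blue', 'grey', 'blue', 'blue', 'blue', 'blue',
--         'orange', 'grey', 'orange', 'orange', 'orange', 'orange', 'orange', 'orange', 'orange', 'orange', 'orange', 'orange',
--         'purple', 'purple', 'purple', 'purple', 'purple', 'purple', 'purple', 'purple', 'purple', 'purple', 'purple', 'purple', 'purple']
--
--
-- def departments_preprocessing(input_name):
--     colors1 = ["black" if p == input_name else c
--                for p, c in zip(_LABELS, _BASE_COLORS)]
--     return _LABELS, _PARENTS, colors1
-- ===== Notes on version B (the rewrite author's own statement) =====
-- stated objective: alternative
-- what changed: B precomputes the per-label department color as a constant table aligned with the constant labels list and builds colors1 in one zip pass that only overrides the matched label with 'black', eliminating the runtime six-way elif membership classification entirely.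
import Mathlib
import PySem

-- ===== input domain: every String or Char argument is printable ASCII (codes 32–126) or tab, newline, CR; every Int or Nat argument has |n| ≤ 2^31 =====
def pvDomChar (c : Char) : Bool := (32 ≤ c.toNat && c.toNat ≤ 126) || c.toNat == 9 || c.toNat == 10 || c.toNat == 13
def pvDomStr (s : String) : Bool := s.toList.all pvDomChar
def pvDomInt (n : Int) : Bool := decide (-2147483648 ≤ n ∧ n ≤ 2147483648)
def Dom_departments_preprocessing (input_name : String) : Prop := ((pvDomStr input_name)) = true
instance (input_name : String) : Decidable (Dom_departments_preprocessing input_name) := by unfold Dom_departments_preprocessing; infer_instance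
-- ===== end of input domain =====

-- B replaces A's runtime six-way elif membership classification by a precomputed constant
-- per-label color table plus a single zip pass overriding the matched label with "black".

-- ===== PORT A =====
def pvLabels : List String :=
  ["Board",
   "Engineering", "IT", "Security", "Facilities",
   "Dedos", "Onda", "Balas", "Nubarron", "Haber", "E. Orilla", "V. Frente", "Borrasca", "Cazar", "Azada", "B. Frente", "Calzas", "Tempestad", "K. Orilla",
   "Bergen", "Forluniau", "Baza", "Calixto", "Flecha", "Alcazar",
   "Resumir", "Lais", "Fusil", "V. Lagos", "Osvaldo", "Bodrogi", "E. Vann", "I. Vann", "Cocinaro", "Herrero", "M.Mies", "Ferro",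
   "Ovan", "Coginian", "B. Hawelon", "V. Morlun", "Nant", "Hafon", "Awelon", "Arpa", "C. Hawelon", "H. Mies", "A. Morlun", "Scozzesse", "Morluniau"]

def pvParents : List String :=
  ["",
   "Board", "Board", "Board", "Board",
   "Engineering", "Engineering", "Dedos", "Dedos", "Dedos", "Onda", "Onda", "Onda", "Onda", "Balas", "Nubarron", "E. Orilla", "V. Frente", "Borrasca",
   "IT", "Bergen", "Bergen", "Bergen", "Bergen", "Bergen",
   "Security", "Resumir", "Resumir", "Resumir", "Resumir", "Resumir", "Resumir", "Fusil", "V. Lagos", "Osvaldo", "Bodrogi", "E. Vann",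
   "Facilities", "Ovan", "Ovan", "Ovan", "Ovan", "Ovan", "Coginian", "Coginian", "B. Hawelon", "B. Hawelon", "V. Morlun", "Nant", "Hafon"]

def pvEngineering : List String :=
  ["Engineering", "Dedos", "Onda", "Balas", "Nubarron", "E. Orilla", "V. Frente", "Borrasca", "Cazar", "Azada", "B. Frente", "Calzas", "Tempestad", "K. Orilla"]
def pvIt : List String := ["IT", "Bergen", "Baza", "Calixto", "Flecha", "Alcazar"]
def pvSecurity : List String :=
  ["Security", "Resumir", "Fusil", "V. Lagos", "Osvaldo", "Bodrogi", "E. Vann", "I. Vann", "Cocinaro", "Herrero", "M.Mies", "Ferro"]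
def pvFacilities : List String :=
  ["Facilities", "Ovan", "Coginian", "B. Hawelon", "V. Morlun", "Nant", "Hafon", "Awelon", "Arpa", "C. Hawelon", "H. Mies", "A. Morlun", "Scozzesse", "Morluniau"]
def pvAssitents : List String := ["Haber", "Forluniau", "Lais"]
def pvExecutive : List String := ["Board"]

-- A's loop body: the six-way elif chain, branch for branch
def pvAStep (input_name : String) (acc : List String) (p : String) : List String :=
  if p == input_name then acc ++ ["black"]
  else if pvEngineering.contains p then acc ++ ["red"]
  else if pvAssitents.contains p then acc ++ ["grey"]
  else if pvIt.contains p then acc ++ ["blue"]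
  else if pvSecurity.contains p then acc ++ ["orange"]
  else if pvFacilities.contains p then acc ++ ["purple"]
  else if pvExecutive.contains p then acc ++ ["green"]
  else acc

def departments_preprocessing (input_name : String) : List String × List String × List String :=
  (pvLabels, pvParents, pvLabels.foldl (pvAStep input_name) [])

-- ===== PORT B =====
-- constant per-label department color, aligned with pvLabels (Source B's _BASE_COLORS)
def pvBaseColors : List String :=
  ["green",
   "red", "blue", "orange", "purple",
   "red", "red", "red", "red", "grey", "red", "red", "red", "red", "red", "red", "red", "red", "red",
   "blue", "grey", "blue", "blue", "blue", "blue",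
   "orange", "grey", "orange", "orange", "orange", "orange", "orange", "orange", "orange", "orange", "orange", "orange",
   "purple", "purple", "purple", "purple", "purple", "purple", "purple", "purple", "purple", "purple", "purple", "purple", "purple"]

def departments_preprocessing_alt (input_name : String) : List String × List String × List String :=
  (pvLabels, pvParents,
   (pvLabels.zip pvBaseColors).map (fun pc => if pc.1 == input_name then "black" else pc.2))

-- ===== PRECONDITION & SPEC =====
def Spec_departments_preprocessing (input_name : String) (out : List String × List String × List String) : Prop := out = departments_preprocessing_alt input_name
instance (input_name : String) (out : List String × List String × List String) : Decidable (Spec_departments_preprocessing input_name out) := by unfold Spec_departments_preprocessing; infer_instance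

-- ===== CLAIM (what is proved, stated in full; the proofs are below) =====
def Claim_equal_departments_preprocessing : Prop := ∀ (input_name : String), Dom_departments_preprocessing input_name → Spec_departments_preprocessing input_name (departments_preprocessing input_name)

-- ===== LEMMAS AND PROOFS =====

-- A's elif chain, input_name-free part, as a pure label -> Option color function
def pvChainOpt (p : String) : Option String :=
  if pvEngineering.contains p then some "red"
  else if pvAssitents.contains p then some "grey"
  else if pvIt.contains p then some "blue"
  else if pvSecurity.contains p then some "orange"
  else if pvFacilities.contains p then some "purple"
  else if pvExecutive.contains p then some "green"
  else none

theorem pvAStep_eq (input_name p : String) (acc : List String) :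
    pvAStep input_name acc p
      = acc ++ (if p == input_name then ["black"] else (pvChainOpt p).toList) := by
  simp only [pvAStep, pvChainOpt]
  split_ifs <;> simp_all

-- B's precomputed table entries coincide with A's elif chain on each (label, color) pair
set_option maxRecDepth 100000 in
theorem pvBase_correct :
    ∀ pc ∈ pvLabels.zip pvBaseColors, pvChainOpt pc.1 = some pc.2 := by decide

theorem pvFlatMap_eq_map_zip (input_name : String) :
    ∀ (ls cs : List String), (∀ pc ∈ ls.zip cs, pvChainOpt pc.1 = some pc.2) →
      ls.length = cs.length →
      (ls.flatMap (fun p => if p == input_name then ["black"] else (pvChainOpt p).toList))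
        = (ls.zip cs).map (fun pc => if pc.1 == input_name then "black" else pc.2)
  | [], [], _, _ => by simp
  | p :: ls, c :: cs, h, hlen => by
    have hpc : pvChainOpt p = some c := h (p, c) (by simp)
    have ih := pvFlatMap_eq_map_zip input_name ls cs
      (fun pc hm => h pc (by simp [hm])) (by simpa using hlen)
    simp only [List.zip_cons_cons, List.flatMap_cons, List.map_cons, hpc,
      Option.toList_some, ih]
    split_ifs <;> simp

-- ===== VERDICT (by name: the statement is the Claim_ definition above) =====
theorem departments_preprocessing_spec : Claim_equal_departments_preprocessing := by
  intro input_name _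
  unfold Spec_departments_preprocessing departments_preprocessing departments_preprocessing_alt
  refine congrArg _ (congrArg _ ?_)
  calc pvLabels.foldl (pvAStep input_name) []
      = pvLabels.foldl (fun acc p =>
          acc ++ (if p == input_name then ["black"] else (pvChainOpt p).toList)) [] := by
        have h : pvAStep input_name = fun acc p =>
            acc ++ (if p == input_name then ["black"] else (pvChainOpt p).toList) :=
          funext fun acc => funext fun p => pvAStep_eq input_name p acc
        rw [h]
    _ = [] ++ pvLabels.flatMap
          (fun p => if p == input_name then ["black"] else (pvChainOpt p).toList) :=
        PySem.List.foldl_append_eq_flatMap _ _ _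
    _ = (pvLabels.zip pvBaseColors).map
          (fun pc => if pc.1 == input_name then "black" else pc.2) := by
        rw [List.nil_append]
        exact pvFlatMap_eq_map_zip input_name pvLabels pvBaseColors pvBase_correct (by decide)
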